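-- pv_equiv track=rewrite | github.com/cwolson03/the-firm | bots/weather.py | _aigefs_parse_idx_for_tmp2m
-- ===== SOURCE A (Python) =====
-- def _aigefs_parse_idx_for_tmp2m(idx_text):
--     """Parse .idx file, return (byte_start, byte_end) for TMP:2 m above ground."""
--     lines = idx_text.strip().split("\n")
--     records = []
--     for line in lines:
--         parts = line.split(":")
--         if len(parts) >= 5:
--             records.append({"offset": int(parts[1]), "var": parts[3], "level": parts[4]})
--     for i, rec in enumerate(records):
--         if rec["var"] == "TMP" and "2 m" in rec["level"]:
--             start = rec["offset"]
--             end = records[i+1]["offset"] - 1 if i+1 < len(records) else None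
--             return start, end
--     return None, None
-- ===== SOURCE B (Python) =====
-- def _aigefs_parse_idx_for_tmp2m(idx_text):
--     """Single streaming pass: remember the matched record's offset, return on the next valid record."""
--     pending = None
--     for line in idx_text.strip().split("\n"):
--         parts = line.split(":")
--         if len(parts) < 5:
--             continue
--         if pending is not None:
--             return pending, int(parts[1]) - 1
--         if parts[3] == "TMP" and "2 m" in parts[4]:
--             pending = int(parts[1])
--     return pending, None
-- ===== Notes on version B (the rewrite author's own statement) =====
-- stated objective: simpler
-- what changed: Replaces A's two-phase build-a-records-list-then-scan-with-index-lookup by a single streaming pass over the lines that keeps only a pending start offset and returns at the next valid record; only the matched record's and its successor's offsets are ever parsed.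
import Mathlib
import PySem

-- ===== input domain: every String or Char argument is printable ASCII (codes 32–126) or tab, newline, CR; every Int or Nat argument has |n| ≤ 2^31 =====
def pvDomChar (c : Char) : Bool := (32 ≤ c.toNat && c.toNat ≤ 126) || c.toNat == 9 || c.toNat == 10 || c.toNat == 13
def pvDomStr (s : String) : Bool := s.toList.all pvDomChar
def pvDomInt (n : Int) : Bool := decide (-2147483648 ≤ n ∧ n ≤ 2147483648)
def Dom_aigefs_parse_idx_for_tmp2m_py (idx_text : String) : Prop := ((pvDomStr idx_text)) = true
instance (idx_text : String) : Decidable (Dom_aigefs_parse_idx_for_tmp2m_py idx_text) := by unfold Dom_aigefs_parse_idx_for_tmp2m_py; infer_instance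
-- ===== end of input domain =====

-- B replaces A's build-all-records-then-scan by a single streaming pass keeping only a
-- pending start offset (objective: simpler, O(1) extra space instead of a records list).

-- ===== PORT A =====
-- second loop of A: enumerate(records), on the first TMP/2 m record return
-- (offset, next record's offset - 1 or None)
def pvSearchA : List (Int × String × String) → Option Int × Option Int
  | [] => (none, none)
  | r :: rest =>
    if r.2.1 == "TMP" && PySem.Str.isIn "2 m" r.2.2 then
      (some r.1, match rest with | [] => none | r2 :: _ => some (r2.1 - 1))
    else pvSearchA rest

def aigefs_parse_idx_for_tmp2m_py (idx_text : String) : Option Int × Option Int :=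
  let lines := (PySem.Str.split? (PySem.Str.strip idx_text) "\n").getD []
  let records := lines.foldl (fun recs line =>
    let parts := (PySem.Str.split? line ":").getD []
    if parts.length ≥ 5 then
      recs ++ [((PySem.Int.ofStr? (parts.getD 1 "")).getD 0, parts.getD 3 "", parts.getD 4 "")]
    else recs) []
  pvSearchA records

-- ===== PORT B =====
-- single pass over the lines; pending = offset of the matched record, if found already
def pvLoopB : List String → Option Int → Option Int × Option Int
  | [], pending => (pending, none)
  | line :: rest, pending =>
    let parts := (PySem.Str.split? line ":").getD []
    if parts.length < 5 then pvLoopB rest pending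
    else
      match pending with
      | some s => (some s, some ((PySem.Int.ofStr? (parts.getD 1 "")).getD 0 - 1))
      | none =>
        if parts.getD 3 "" == "TMP" && PySem.Str.isIn "2 m" (parts.getD 4 "") then
          pvLoopB rest (some ((PySem.Int.ofStr? (parts.getD 1 "")).getD 0))
        else pvLoopB rest none

def aigefs_parse_idx_for_tmp2m_py_alt (idx_text : String) : Option Int × Option Int :=
  pvLoopB ((PySem.Str.split? (PySem.Str.strip idx_text) "\n").getD []) none

-- ===== PRECONDITION & SPEC =====
-- Pre_ excludes exactly the inputs where Python A raises ValueError: a line with ≥ 5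
-- colon-separated parts whose second part is not int()-parsable.
def Pre_aigefs_parse_idx_for_tmp2m_py (idx_text : String) : Prop :=
  ∀ line ∈ (PySem.Str.split? (PySem.Str.strip idx_text) "\n").getD [],
    ((PySem.Str.split? line ":").getD []).length ≥ 5 →
    (PySem.Int.ofStr? (((PySem.Str.split? line ":").getD []).getD 1 "")).isSome = true
instance (idx_text : String) : Decidable (Pre_aigefs_parse_idx_for_tmp2m_py idx_text) := by
  unfold Pre_aigefs_parse_idx_for_tmp2m_py; infer_instance

def pvWitness_aigefs_parse_idx_for_tmp2m_py : String :=
  "1:0:d:TMP:2 m above ground:\n2:100:d:UGRD:10 m above ground:"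

def Spec_aigefs_parse_idx_for_tmp2m_py (idx_text : String) (out : Option Int × Option Int) : Prop := out = aigefs_parse_idx_for_tmp2m_py_alt idx_text
instance (idx_text : String) (out : Option Int × Option Int) : Decidable (Spec_aigefs_parse_idx_for_tmp2m_py idx_text out) := by unfold Spec_aigefs_parse_idx_for_tmp2m_py; infer_instance

-- ===== CLAIM (what is proved, stated in full; the proofs are below) =====
def Claim_equal_aigefs_parse_idx_for_tmp2m_py : Prop := ∀ (idx_text : String), Dom_aigefs_parse_idx_for_tmp2m_py idx_text → Pre_aigefs_parse_idx_for_tmp2m_py idx_text → Spec_aigefs_parse_idx_for_tmp2m_py idx_text (aigefs_parse_idx_for_tmp2m_py idx_text)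

-- ===== LEMMAS AND PROOFS =====

-- the record a single line contributes (none if it has fewer than 5 parts)
def pvRec (line : String) : Option (Int × String × String) :=
  let parts := (PySem.Str.split? line ":").getD []
  if parts.length ≥ 5 then
    some ((PySem.Int.ofStr? (parts.getD 1 "")).getD 0, parts.getD 3 "", parts.getD 4 "")
  else none

theorem pvFoldRecords (lines : List String) (acc : List (Int × String × String)) :
    lines.foldl (fun recs line =>
      let parts := (PySem.Str.split? line ":").getD []
      if parts.length ≥ 5 then
        recs ++ [((PySem.Int.ofStr? (parts.getD 1 "")).getD 0, parts.getD 3 "", parts.getD 4 "")]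
      else recs) acc = acc ++ lines.filterMap pvRec := by
  induction lines generalizing acc with
  | nil => simp
  | cons line rest ih =>
    rw [List.foldl_cons, ih, List.filterMap_cons]
    by_cases h : ((PySem.Str.split? line ":").getD []).length ≥ 5 <;>
      simp [pvRec, h]

theorem pvRec_none (line : String)
    (h : ((PySem.Str.split? line ":").getD []).length < 5) : pvRec line = none := by
  simp only [pvRec]
  rw [if_neg]; omega

theorem pvRec_some (line : String)
    (h : ((PySem.Str.split? line ":").getD []).length ≥ 5) :
    pvRec line = some
      ((PySem.Int.ofStr? (((PySem.Str.split? line ":").getD []).getD 1 "")).getD 0,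
       ((PySem.Str.split? line ":").getD []).getD 3 "",
       ((PySem.Str.split? line ":").getD []).getD 4 "") := by
  simp only [pvRec]
  rw [if_pos h]

theorem pvLoopB_some (lines : List String) (s : Int) :
    pvLoopB lines (some s) =
      (some s, match lines.filterMap pvRec with
               | [] => none
               | r :: _ => some (r.1 - 1)) := by
  induction lines with
  | nil => simp [pvLoopB]
  | cons line rest ih =>
    by_cases h : ((PySem.Str.split? line ":").getD []).length < 5
    · rw [List.filterMap_cons, pvRec_none line h]
      simpa [pvLoopB, h] using ih
    · rw [List.filterMap_cons, pvRec_some line (by omega)]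
      simp [pvLoopB, h]

theorem pvLoopB_none (lines : List String) :
    pvLoopB lines none = pvSearchA (lines.filterMap pvRec) := by
  induction lines with
  | nil => simp [pvLoopB, pvSearchA]
  | cons line rest ih =>
    by_cases h : ((PySem.Str.split? line ":").getD []).length < 5
    · rw [List.filterMap_cons, pvRec_none line h]
      simpa [pvLoopB, h] using ih
    · rw [List.filterMap_cons, pvRec_some line (by omega)]
      simp [pvLoopB, h, pvSearchA, pvLoopB_some]
      split_ifs <;> simp [ih]

-- ===== VERDICT (by name: the statement is the Claim_ definition above) =====
theorem aigefs_parse_idx_for_tmp2m_py_spec : Claim_equal_aigefs_parse_idx_for_tmp2m_py := by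
  intro idx_text _ _
  simp only [Spec_aigefs_parse_idx_for_tmp2m_py, aigefs_parse_idx_for_tmp2m_py,
    aigefs_parse_idx_for_tmp2m_py_alt, pvFoldRecords, List.nil_append, pvLoopB_none]
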